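-- pv_equiv track=rewrite | github.com/pypi-data/pypi-mirror-320 | packages/tfdocs-cli/tfdocs_cli-0.2.24-py3-none-any.whl/tfdocs/models/types.py | mask_braces_content
-- ===== SOURCE A (Python) =====
-- def mask_braces_content(s: str):
--     content_dict = {}
--     masked_s = ""
--     idx = 1
--     i = 0
--     n = len(s)
--
--     while i < n:
--         if s[i] == "{":
--             start = i
--             nesting = 1
--             i += 1
--             while i < n and nesting > 0:
--                 if s[i] == "{":
--                     nesting += 1
--                 elif s[i] == "}":
--                     nesting -= 1
--                 i += 1
--             content = s[start:i]
--             key = f"__mask_{idx}__"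
--             content_dict[key] = content
--             masked_s += key
--             idx += 1
--         else:
--             masked_s += s[i]
--             i += 1
--
--     return masked_s, content_dict
-- ===== SOURCE B (Python) =====
-- def mask_braces_content(s: str):
--     n = len(s)
--     # pass 1: single depth-counter scan collecting top-level brace spans
--     spans = []
--     depth = 0
--     start = 0
--     for i, ch in enumerate(s):
--         if depth == 0:
--             if ch == "{":
--                 depth = 1
--                 start = i
--         else:
--             if ch == "{":
--                 depth += 1
--             elif ch == "}":
--                 depth -= 1
--                 if depth == 0:
--                     spans.append((start, i + 1))
--     if depth > 0:
--         spans.append((start, n))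
--     # pass 2: assemble masked string and mapping from the spans
--     parts = []
--     content_dict = {}
--     prev = 0
--     for idx, (st, en) in enumerate(spans, 1):
--         parts.append(s[prev:st])
--         key = f"__mask_{idx}__"
--         content_dict[key] = s[st:en]
--         parts.append(key)
--         prev = en
--     parts.append(s[prev:])
--     return "".join(parts), content_dict
-- ===== Notes on version B (the rewrite author's own statement) =====
-- stated objective: faster
-- what changed: B separates span discovery from output assembly: one depth-counter scan records the (start,end) pairs of top-level brace spans (flushing an unclosed span to len(s)), then a second pass over the spans builds the masked string from parts joined once and the mapping, instead of A's interleaved nested while-loops accumulating the result with quadratic string +=.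
import Mathlib
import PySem

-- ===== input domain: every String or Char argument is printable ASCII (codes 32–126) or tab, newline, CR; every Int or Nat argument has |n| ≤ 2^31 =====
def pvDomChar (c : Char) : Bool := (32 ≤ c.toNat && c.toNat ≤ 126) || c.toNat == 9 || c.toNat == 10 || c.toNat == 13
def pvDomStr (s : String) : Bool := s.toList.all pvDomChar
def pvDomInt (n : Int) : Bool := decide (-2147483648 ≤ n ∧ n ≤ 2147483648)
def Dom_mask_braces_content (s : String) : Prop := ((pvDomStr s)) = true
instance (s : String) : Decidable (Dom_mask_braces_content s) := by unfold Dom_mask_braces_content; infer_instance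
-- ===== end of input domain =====

-- B replaces A's interleaved nested index loops by two passes: a depth-counter scan
-- collecting top-level brace spans, then an assembly pass over the spans (objective: alternative).

-- shared helper: s[a:b] for 0 ≤ a ≤ b ≤ len (exact for the in-range slices both programs take)
def sliceN (cs : List Char) (a b : Nat) : List Char := (cs.drop a).take (b - a)

-- ===== PORT A =====
-- A's inner `while i < n and nesting > 0` loop; returns the final i.
-- `fuel` is a pure totality guard (each iteration increments i toward n, so fuel = n
-- is never exhausted at the call sites below); it changes nothing about the computation.
def innA (cs : List Char) (n : Nat) : Nat → Nat → Int → Nat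
  | 0, i, _ => i
  | fuel + 1, i, nesting =>
    if i < n ∧ 0 < nesting then
      let c := cs.getD i ' '   -- s[i]; index in range, exact
      if c = '{' then innA cs n fuel (i + 1) (nesting + 1)
      else if c = '}' then innA cs n fuel (i + 1) (nesting - 1)
      else innA cs n fuel (i + 1) nesting
    else i

-- A's outer while loop with its accumulators (same fuel guard: i strictly increases)
def outA (cs : List Char) (n : Nat) : Nat → Nat → Int → List Char →
    List (String × String) → String × (List (String × String))
  | 0, _, _, masked, dict => (String.ofList masked, dict)
  | fuel + 1, i, idx, masked, dict =>
    if i < n then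
      if cs.getD i ' ' = '{' then
        let j := innA cs n n (i + 1) 1
        let content := sliceN cs i j
        let key := "__mask_" ++ PySem.Int.toStr idx ++ "__"
        -- key is freshly generated and never already in the dict, so the dict assignment appends (exact)
        outA cs n fuel j (idx + 1) (masked ++ key.toList) (dict ++ [(key, String.ofList content)])
      else outA cs n fuel (i + 1) idx (masked ++ [cs.getD i ' ']) dict
    else (String.ofList masked, dict)

def mask_braces_content (s : String) : String × (List (String × String)) :=
  outA s.toList s.toList.length s.toList.length 0 1 [] []

-- ===== PORT B =====
-- pass 1: depth-counter scan over the characters (with running index i), collecting top-level spans;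
-- the [] case is the post-loop `if depth > 0` flush (i = len(s) there)
def scanSpans : List Char → Nat → Int → Nat → List (Nat × Nat)
  | [], i, depth, start => if 0 < depth then [(start, i)] else []
  | c :: rest, i, depth, start =>
    if depth = 0 then
      if c = '{' then scanSpans rest (i + 1) 1 i
      else scanSpans rest (i + 1) depth start
    else
      if c = '{' then scanSpans rest (i + 1) (depth + 1) start
      else if c = '}' then
        if depth = 1 then (start, i + 1) :: scanSpans rest (i + 1) 0 0
        else scanSpans rest (i + 1) (depth - 1) start
      else scanSpans rest (i + 1) depth start

-- pass 2: walk the spans, building the masked parts and the dict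
def assembleB (cs : List Char) (spans : List (Nat × Nat)) (prev : Nat) (idx : Int)
    (masked : List Char) (dict : List (String × String)) : String × (List (String × String)) :=
  match spans with
  | [] => (String.ofList (masked ++ cs.drop prev), dict)   -- trailing s[prev:]
  | (st, en) :: rest =>
    let key := "__mask_" ++ PySem.Int.toStr idx ++ "__"
    assembleB cs rest en (idx + 1)
      (masked ++ sliceN cs prev st ++ key.toList)
      (dict ++ [(key, String.ofList (sliceN cs st en))])

def mask_braces_content_alt (s : String) : String × (List (String × String)) :=
  assembleB s.toList (scanSpans s.toList 0 0 0) 0 1 [] []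

-- ===== PRECONDITION & SPEC =====
def Spec_mask_braces_content (s : String) (out : String × (List (String × String))) : Prop := out = mask_braces_content_alt s
instance (s : String) (out : String × (List (String × String))) : Decidable (Spec_mask_braces_content s out) := by unfold Spec_mask_braces_content; infer_instance

-- ===== CLAIM (what is proved, stated in full; the proofs are below) =====
def Claim_equal_mask_braces_content : Prop := ∀ (s : String), Dom_mask_braces_content s → Spec_mask_braces_content s (mask_braces_content s)

-- ===== LEMMAS AND PROOFS =====

-- innA ignores the fuel as long as it dominates n - i
theorem innA_irrel (cs : List Char) (n : Nat) :
    ∀ (f f' i : Nat) (d : Int), n - i ≤ f → n - i ≤ f' →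
      innA cs n f i d = innA cs n f' i d := by
  intro f
  induction f with
  | zero =>
    intro f' i d h h'
    cases f' with
    | zero => rfl
    | succ m => simp only [innA]; rw [if_neg (by omega)]
  | succ f ih =>
    intro f' i d h h'
    by_cases hc : i < n ∧ 0 < d
    · cases f' with
      | zero => omega
      | succ m =>
        simp only [innA]
        rw [if_pos hc, if_pos hc]
        split_ifs
        · exact ih m (i + 1) (d + 1) (by omega) (by omega)
        · exact ih m (i + 1) (d - 1) (by omega) (by omega)
        · exact ih m (i + 1) d (by omega) (by omega)
    · cases f' with
      | zero => simp only [innA]; rw [if_neg hc]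
      | succ m => simp only [innA]; rw [if_neg hc, if_neg hc]

theorem innA_ge (cs : List Char) (n : Nat) :
    ∀ (f i : Nat) (d : Int), i ≤ innA cs n f i d := by
  intro f
  induction f with
  | zero => intro i d; exact le_rfl
  | succ f ih =>
    intro i d
    simp only [innA]
    by_cases hc : i < n ∧ 0 < d
    · rw [if_pos hc]; split_ifs
      · have := ih (i + 1) (d + 1); omega
      · have := ih (i + 1) (d - 1); omega
      · have := ih (i + 1) d; omega
    · rw [if_neg hc]

theorem innA_le (cs : List Char) (n : Nat) :
    ∀ (f i : Nat) (d : Int), i ≤ n → innA cs n f i d ≤ n := by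
  intro f
  induction f with
  | zero => intro i d hi; exact hi
  | succ f ih =>
    intro i d hi
    simp only [innA]
    by_cases hc : i < n ∧ 0 < d
    · rw [if_pos hc]; split_ifs
      · exact ih (i + 1) (d + 1) (by omega)
      · exact ih (i + 1) (d - 1) (by omega)
      · exact ih (i + 1) d (by omega)
    · rw [if_neg hc]; exact hi

-- the canonical (fully fuelled) inner loop, as outA calls it
def innAc (cs : List Char) (i : Nat) (d : Int) : Nat := innA cs cs.length cs.length i d

theorem innAc_stop (cs : List Char) (i : Nat) (d : Int) (h : ¬(i < cs.length ∧ 0 < d)) :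
    innAc cs i d = i := by
  unfold innAc
  cases hL : cs.length with
  | zero => rfl
  | succ m => simp only [innA]; rw [if_neg (by omega)]

theorem innAc_step (cs : List Char) (i : Nat) (d : Int) (hi : i < cs.length) (hd : 0 < d) :
    innAc cs i d =
      if cs.getD i ' ' = '{' then innAc cs (i + 1) (d + 1)
      else if cs.getD i ' ' = '}' then innAc cs (i + 1) (d - 1)
      else innAc cs (i + 1) d := by
  unfold innAc
  cases hL : cs.length with
  | zero => omega
  | succ m =>
    rw [innA_irrel cs (m + 1) (m + 1) (m + 2) i d (by omega) (by omega)]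
    conv_lhs => rw [innA]
    rw [if_pos (by omega : i < m + 1 ∧ 0 < d)]

theorem drop_cons_getD (cs : List Char) (i : Nat) (h : i < cs.length) :
    cs.drop i = cs.getD i ' ' :: cs.drop (i + 1) := by
  rw [List.drop_eq_getElem_cons h, List.getD_eq_getElem cs ' ' h]

theorem sliceN_self (cs : List Char) (i : Nat) : sliceN cs i i = [] := by
  simp [sliceN]

theorem sliceN_cons (cs : List Char) (i st : Nat) (hn : i < cs.length) (hst : i < st) :
    sliceN cs i st = cs.getD i ' ' :: sliceN cs (i + 1) st := by
  unfold sliceN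
  rw [drop_cons_getD cs i hn]
  have : st - i = (st - (i + 1)) + 1 := by omega
  rw [this, List.take_succ_cons]

-- at depth > 0 the scan's first span starts at the carried `start`
theorem scan_head_pos (l : List Char) (i : Nat) (d : Int) (st0 : Nat) (hd : 0 < d) :
    ∃ j tl, scanSpans l i d st0 = (st0, j) :: tl := by
  induction l generalizing i d st0 with
  | nil => exact ⟨i, [], by simp [scanSpans, hd]⟩
  | cons c rest ih =>
    rw [scanSpans]
    rw [if_neg (by omega)]
    by_cases h1 : c = '{'
    · rw [if_pos h1]; exact ih (i + 1) (d + 1) st0 (by omega)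
    · rw [if_neg h1]
      by_cases h2 : c = '}'
      · rw [if_pos h2]
        by_cases h3 : d = 1
        · rw [if_pos h3]; exact ⟨i + 1, _, rfl⟩
        · rw [if_neg h3]; exact ih (i + 1) (d - 1) st0 (by omega)
      · rw [if_neg h2]; exact ih (i + 1) d st0 hd

-- at depth 0 every emitted span starts at or after the current index
theorem scan_head_ge (l : List Char) (i st en : Nat) (tl : List (Nat × Nat))
    (h : scanSpans l i 0 0 = (st, en) :: tl) : i ≤ st := by
  induction l generalizing i st en tl with
  | nil => simp [scanSpans] at h
  | cons c rest ih =>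
    rw [scanSpans, if_pos rfl] at h
    by_cases h1 : c = '{'
    · rw [if_pos h1] at h
      obtain ⟨j, tl', hj⟩ := scan_head_pos rest (i + 1) 1 i (by omega)
      rw [hj] at h
      cases h; omega
    · rw [if_neg h1] at h
      have := ih (i + 1) st en tl h; omega

-- INNER: a positive-depth scan of the suffix emits exactly the span closed by A's inner loop
theorem scan_inner (cs : List Char) (k : Nat) : ∀ (i : Nat) (d : Int) (st0 : Nat),
    cs.length - i ≤ k → i ≤ cs.length → 0 < d →
    scanSpans (cs.drop i) i d st0 =
      (st0, innAc cs i d) :: scanSpans (cs.drop (innAc cs i d)) (innAc cs i d) 0 0 := by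
  induction k with
  | zero =>
    intro i d st0 hk hi hd
    have hin : i = cs.length := by omega
    rw [innAc_stop cs i d (by omega)]
    subst hin
    simp [scanSpans, hd]
  | succ k ih =>
    intro i d st0 hk hi hd
    by_cases hlt : i < cs.length
    · rw [drop_cons_getD cs i hlt]
      rw [scanSpans]
      rw [if_neg (by omega)]
      rw [innAc_step cs i d hlt hd]
      by_cases h1 : cs.getD i ' ' = '{'
      · rw [if_pos h1]; simp only [h1, if_pos]
        exact ih (i + 1) (d + 1) st0 (by omega) (by omega) (by omega)
      · rw [if_neg h1]; simp only [h1, if_false]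
        by_cases h2 : cs.getD i ' ' = '}'
        · rw [if_pos h2]; simp only [h2, if_pos]
          by_cases h3 : d = 1
          · rw [if_pos h3]
            have hstop : innAc cs (i + 1) (d - 1) = i + 1 := by
              rw [innAc_stop cs (i + 1) (d - 1) (by omega)]
            rw [h3] at hstop ⊢
            norm_num at hstop ⊢
            rw [hstop]
            exact ⟨rfl, rfl⟩
          · rw [if_neg h3]
            exact ih (i + 1) (d - 1) st0 (by omega) (by omega) (by omega)
        · simp only [if_neg h2]
          exact ih (i + 1) d st0 (by omega) (by omega) hd
    · have hin : i = cs.length := by omega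
      rw [innAc_stop cs i d (by omega)]
      subst hin
      simp [scanSpans, hd]

-- SHIFT: assembly from prev = i with a literal char copied equals assembly from i+1
theorem assembleB_shift (cs : List Char) (S : List (Nat × Nat)) (i : Nat) (idx : Int)
    (masked : List Char) (dict : List (String × String))
    (hn : i < cs.length)
    (hhead : ∀ st en tl, S = (st, en) :: tl → i + 1 ≤ st) :
    assembleB cs S i idx masked dict
      = assembleB cs S (i + 1) idx (masked ++ [cs.getD i ' ']) dict := by
  cases S with
  | nil =>
    simp only [assembleB]
    rw [drop_cons_getD cs i hn]
    simp
  | cons p rest =>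
    obtain ⟨st, en⟩ := p
    have hst : i + 1 ≤ st := hhead st en rest rfl
    simp only [assembleB]
    rw [sliceN_cons cs i st hn (by omega)]
    simp

-- MAIN: A's interleaved loop equals B's two passes, for any accumulators
theorem main_lemma (cs : List Char) : ∀ (f i : Nat) (idx : Int)
    (masked : List Char) (dict : List (String × String)),
    cs.length - i ≤ f → i ≤ cs.length →
    outA cs cs.length f i idx masked dict
      = assembleB cs (scanSpans (cs.drop i) i 0 0) i idx masked dict := by
  intro f
  induction f with
  | zero =>
    intro i idx masked dict hk hi
    have hin : i = cs.length := by omega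
    subst hin
    simp [outA, scanSpans, assembleB]
  | succ f ih =>
    intro i idx masked dict hk hi
    by_cases hlt : i < cs.length
    · rw [outA, if_pos hlt]
      rw [drop_cons_getD cs i hlt]
      rw [scanSpans, if_pos rfl]
      by_cases h1 : cs.getD i ' ' = '{'
      · rw [if_pos h1]
        simp only [h1, if_pos]
        have hj1 : i + 1 ≤ innAc cs (i + 1) 1 := innA_ge cs cs.length cs.length (i + 1) 1
        have hj2 : innAc cs (i + 1) 1 ≤ cs.length :=
          innA_le cs cs.length cs.length (i + 1) 1 (by omega)
        rw [scan_inner cs (cs.length - (i + 1)) (i + 1) 1 i (by omega) (by omega) (by omega)]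
        simp only [assembleB]
        rw [sliceN_self]
        simp only [List.append_nil]
        exact ih (innAc cs (i + 1) 1) (idx + 1) _ _ (by omega) hj2
      · rw [if_neg h1]
        simp only [h1, if_false]
        rw [ih (i + 1) idx (masked ++ [cs.getD i ' ']) dict (by omega) (by omega)]
        exact (assembleB_shift cs _ i idx masked dict hlt
          (fun st en tl h => scan_head_ge (cs.drop (i + 1)) (i + 1) st en tl h)).symm
    · have hin : i = cs.length := by omega
      subst hin
      rw [outA, if_neg (by omega)]
      simp [scanSpans, assembleB]

-- ===== VERDICT (by name: the statement is the Claim_ definition above) =====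
theorem mask_braces_content_spec : Claim_equal_mask_braces_content := by
  intro s _
  unfold Spec_mask_braces_content mask_braces_content mask_braces_content_alt
  have := main_lemma s.toList s.toList.length 0 1 [] [] (by omega) (by omega)
  simpa using this
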